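-- pv_equiv track=rewrite | github.com/ZaitianWang/Data-Processing-Coursework | Chap3/preprocessing.py | get_c_dj
-- ===== SOURCE A (Python) =====
-- def get_c_dj(doc_terms, vocab):
--     c_dj = [] # pat of term co-occur / term conjunctive component
--     for terms in doc_terms:
--         c = []
--         for i in range(len(vocab)):
--             if vocab[i] in terms:
--                 c.append(1)
--             else:
--                 c.append(0)
--         c_dj.append(c)
--     return c_dj
-- ===== SOURCE B (Python) =====
-- def get_c_dj(doc_terms, vocab):
--     # Build once: vocab word -> list of column positions (duplicates kept).
--     index = {}
--     i = 0
--     for w in vocab: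
--         index.setdefault(w, []).append(i)
--         i += 1
--
--     def row_for(terms):
--         row = [0] * len(vocab)
--         for t in terms:
--             for j in index.get(t, []):
--                 row[j] = 1
--         return row
--
--     return [row_for(terms) for terms in doc_terms]
-- ===== Notes on version B (the rewrite author's own statement) =====
-- stated objective: faster
-- what changed: Instead of scanning every document's terms once per vocabulary position, B prebuilds a dict mapping each vocab word to its list of column indices (duplicates kept), starts each row as zeros and flips to 1 only the indexed positions of terms actually present in the document.
import Mathlib
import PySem

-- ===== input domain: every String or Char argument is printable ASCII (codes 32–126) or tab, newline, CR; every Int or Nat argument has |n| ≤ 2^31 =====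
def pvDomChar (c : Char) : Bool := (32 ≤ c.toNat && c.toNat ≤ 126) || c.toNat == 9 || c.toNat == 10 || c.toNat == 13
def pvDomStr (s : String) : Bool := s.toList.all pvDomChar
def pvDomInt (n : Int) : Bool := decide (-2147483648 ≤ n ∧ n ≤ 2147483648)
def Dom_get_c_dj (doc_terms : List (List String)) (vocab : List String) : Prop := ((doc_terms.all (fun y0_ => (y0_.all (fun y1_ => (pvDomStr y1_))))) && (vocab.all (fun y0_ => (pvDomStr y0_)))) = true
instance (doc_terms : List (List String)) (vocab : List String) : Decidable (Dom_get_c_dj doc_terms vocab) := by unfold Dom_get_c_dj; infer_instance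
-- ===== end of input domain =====

-- B replaces A's per-column scan of each document by a prebuilt word→column-indices dict,
-- flipping only the columns of terms actually present (objective: faster).

-- ===== PORT A =====
def get_c_dj (doc_terms : List (List String)) (vocab : List String) : List (List Int) :=
  doc_terms.foldl (fun c_dj terms =>
    c_dj ++ [(PySem.List.pyRange 0 vocab.length 1).foldl (fun c i =>
      if (PySem.List.pyGet? vocab i).any (fun w => terms.contains w) then c ++ [1] else c ++ [0]) []]) []

-- ===== PORT B =====
-- index.setdefault(w, []).append(i) with a running counter i
def pvIndexAux (d : PySem.Dict String (List Nat)) (l : List String) (i : Nat) : PySem.Dict String (List Nat) :=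
  match l with
  | [] => d
  | w :: ws => pvIndexAux (d.insert w ((d.getD w []) ++ [i])) ws (i + 1)

-- row = [0]*len(vocab); for t in terms: for j in index.get(t, []): row[j] = 1
def pvRowFor (index : PySem.Dict String (List Nat)) (n : Nat) (terms : List String) : List Int :=
  terms.foldl (fun row t => (index.getD t []).foldl (fun r j => r.set j 1) row) (List.replicate n 0)

def get_c_dj_alt (doc_terms : List (List String)) (vocab : List String) : List (List Int) :=
  let index := pvIndexAux PySem.Dict.empty vocab 0
  doc_terms.map (pvRowFor index vocab.length)

-- ===== PRECONDITION & SPEC =====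
def Spec_get_c_dj (doc_terms : List (List String)) (vocab : List String) (out : List (List Int)) : Prop := out = get_c_dj_alt doc_terms vocab
instance (doc_terms : List (List String)) (vocab : List String) (out : List (List Int)) : Decidable (Spec_get_c_dj doc_terms vocab out) := by unfold Spec_get_c_dj; infer_instance

-- ===== CLAIM (what is proved, stated in full; the proofs are below) =====
def Claim_equal_get_c_dj : Prop := ∀ (doc_terms : List (List String)) (vocab : List String), Dom_get_c_dj doc_terms vocab → Spec_get_c_dj doc_terms vocab (get_c_dj doc_terms vocab)

-- ===== LEMMAS AND PROOFS =====

-- proof-only helper: the column positions of w in l, counting from s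
def pvIdxs (l : List String) (w : String) (s : Nat) : List Nat :=
  match l with
  | [] => []
  | x :: xs => (if x == w then [s] else []) ++ pvIdxs xs w (s + 1)

theorem pvIndexAux_getD (l : List String) : ∀ (d : PySem.Dict String (List Nat)) (s : Nat) (w : String),
    (pvIndexAux d l s).getD w [] = d.getD w [] ++ pvIdxs l w s := by
  induction l with
  | nil => intro d s w; simp [pvIndexAux, pvIdxs]
  | cons x xs ih =>
    intro d s w
    simp only [pvIndexAux, pvIdxs]
    rw [ih]
    rw [PySem.Dict.getD_insert]
    by_cases h : w = x
    · subst h; simp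
    · simp [h, Ne.symm h, beq_iff_eq]

theorem mem_pvIdxs (l : List String) : ∀ (s j : Nat) (w : String),
    j ∈ pvIdxs l w s ↔ ∃ k, ∃ _h : k < l.length, j = s + k ∧ l[k] = w := by
  induction l with
  | nil => intro s j w; simp [pvIdxs]
  | cons x xs ih =>
    intro s j w
    simp only [pvIdxs, List.mem_append]
    rw [ih]
    constructor
    · rintro (h | ⟨k, hk, rfl, hkw⟩)
      · have hx : x = w ∧ j = s := by
          by_cases hxw : x == w
          · simp [hxw] at h; exact ⟨by simpa using hxw, h⟩
          · simp [hxw] at h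
        exact ⟨0, by simp, by omega, by simpa using hx.1⟩
      · exact ⟨k + 1, by simpa using hk, by omega, by simpa using hkw⟩
    · rintro ⟨k, hk, rfl, hkw⟩
      cases k with
      | zero => left; simp at hkw; simp [hkw]
      | succ k' =>
        right
        refine ⟨k', by simpa using hk, by omega, by simpa using hkw⟩

theorem length_foldl_set (S : List Nat) : ∀ (r : List Int),
    (S.foldl (fun r i => r.set i 1) r).length = r.length := by
  induction S with
  | nil => intro r; simp
  | cons i S ih => intro r; simp [List.foldl_cons, ih]

theorem getElem?_foldl_set (S : List Nat) : ∀ (r : List Int) (j : Nat),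
    (S.foldl (fun r i => r.set i 1) r)[j]? = if j ∈ S ∧ j < r.length then some 1 else r[j]? := by
  induction S with
  | nil => intro r j; simp
  | cons i S ih =>
    intro r j
    simp only [List.foldl_cons]
    rw [ih]
    simp only [List.length_set, List.getElem?_set, List.mem_cons]
    by_cases hmem : j ∈ S
    · by_cases hj : j < r.length
      · simp [hmem, hj]
      · simp [hmem, hj]; intro h; omega
    · by_cases hij : i = j
      · by_cases hj : j < r.length <;> simp [hmem, hij, hj]
      · simp [hmem, hij, Ne.symm hij]

theorem length_terms_fold (index : PySem.Dict String (List Nat)) (terms : List String) :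
    ∀ (r : List Int),
    (terms.foldl (fun row t => (index.getD t []).foldl (fun r j => r.set j 1) row) r).length = r.length := by
  induction terms with
  | nil => intro r; simp
  | cons t ts ih => intro r; simp only [List.foldl_cons]; rw [ih, length_foldl_set]

theorem getElem?_terms_fold (index : PySem.Dict String (List Nat)) (terms : List String) :
    ∀ (r : List Int) (j : Nat),
    (terms.foldl (fun row t => (index.getD t []).foldl (fun r j => r.set j 1) row) r)[j]? =
      if (∃ t ∈ terms, j ∈ index.getD t []) ∧ j < r.length then some 1 else r[j]? := by
  induction terms with
  | nil => intro r j; simp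
  | cons t ts ih =>
    intro r j
    simp only [List.foldl_cons]
    rw [ih, getElem?_foldl_set, length_foldl_set]
    by_cases hj : j < r.length
    · by_cases h1 : j ∈ index.getD t []
      · by_cases h2 : ∃ t' ∈ ts, j ∈ index.getD t' [] <;> simp [h1, h2, hj]
      · by_cases h2 : ∃ t' ∈ ts, j ∈ index.getD t' [] <;> simp [h1, h2, hj]
    · simp [hj]

-- characterisation of B's row
theorem pvRowFor_getElem? (vocab terms : List String) (j : Nat) (hj : j < vocab.length) :
    (pvRowFor (pvIndexAux PySem.Dict.empty vocab 0) vocab.length terms)[j]? =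
      some (if vocab[j] ∈ terms then 1 else 0) := by
  unfold pvRowFor
  rw [getElem?_terms_fold]
  have hcond : (∃ t ∈ terms, j ∈ (pvIndexAux PySem.Dict.empty vocab 0).getD t []) ↔ vocab[j] ∈ terms := by
    constructor
    · rintro ⟨t, ht, hjt⟩
      rw [pvIndexAux_getD] at hjt
      simp only [PySem.Dict.getD_empty, List.nil_append] at hjt
      rw [mem_pvIdxs] at hjt
      obtain ⟨k, hk, hjk, hkw⟩ := hjt
      have : k = j := by omega
      subst this
      rwa [hkw]
    · intro h
      refine ⟨vocab[j], h, ?_⟩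
      rw [pvIndexAux_getD]
      simp only [PySem.Dict.getD_empty, List.nil_append]
      rw [mem_pvIdxs]
      exact ⟨j, hj, by omega, rfl⟩
  by_cases h : vocab[j] ∈ terms
  · simp [hcond, h, hj]
  · simp [hcond, h, hj]

-- characterisation of A's row
theorem rowA_eq_map (vocab terms : List String) :
    ((PySem.List.pyRange 0 vocab.length 1).foldl (fun c i =>
      if (PySem.List.pyGet? vocab i).any (fun w => terms.contains w) then c ++ [1] else c ++ [0]) [])
    = (PySem.List.pyRange 0 vocab.length 1).map
        (fun i => if (PySem.List.pyGet? vocab i).any (fun w => terms.contains w) then (1 : Int) else 0) := by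
  have h : ∀ (c : List Int) (i : Int),
      (if (PySem.List.pyGet? vocab i).any (fun w => terms.contains w) then c ++ [1] else c ++ [0])
      = c ++ [if (PySem.List.pyGet? vocab i).any (fun w => terms.contains w) then (1 : Int) else 0] := by
    intro c i
    exact (apply_ite (fun x : Int => c ++ [x]) _ 1 0).symm
  calc ((PySem.List.pyRange 0 vocab.length 1).foldl (fun c i =>
      if (PySem.List.pyGet? vocab i).any (fun w => terms.contains w) then c ++ [1] else c ++ [0]) [])
      = ((PySem.List.pyRange 0 vocab.length 1).foldl (fun c i =>
        c ++ [if (PySem.List.pyGet? vocab i).any (fun w => terms.contains w) then (1 : Int) else 0]) []) := by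
        congr 1; funext c i; exact h c i
    _ = _ := by
        rw [PySem.List.foldl_append_singleton_eq_map]; simp

theorem row_eq (vocab terms : List String) :
    ((PySem.List.pyRange 0 vocab.length 1).foldl (fun c i =>
      if (PySem.List.pyGet? vocab i).any (fun w => terms.contains w) then c ++ [1] else c ++ [0]) [])
    = pvRowFor (pvIndexAux PySem.Dict.empty vocab 0) vocab.length terms := by
  rw [rowA_eq_map]
  apply List.ext_getElem?
  intro j
  by_cases hj : j < vocab.length
  · rw [pvRowFor_getElem? vocab terms j hj]
    rw [PySem.List.getElem?_map_pyRange_zero _ _ _ hj]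
    simp [PySem.List.pyGet?_natCast, List.getElem?_eq_getElem hj, Option.any]
  · have h1 : ((PySem.List.pyRange 0 (vocab.length : Int) 1).map
        (fun i => if (PySem.List.pyGet? vocab i).any (fun w => terms.contains w) then (1 : Int) else 0)).length = vocab.length := by
      simp [PySem.List.length_pyRange_one]
    have h2 : (pvRowFor (pvIndexAux PySem.Dict.empty vocab 0) vocab.length terms).length = vocab.length := by
      unfold pvRowFor; rw [length_terms_fold]; simp
    rw [List.getElem?_eq_none (by omega), List.getElem?_eq_none (by omega)]

-- ===== VERDICT (by name: the statement is the Claim_ definition above) =====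
theorem get_c_dj_spec : Claim_equal_get_c_dj := by
  intro doc_terms vocab _
  unfold Spec_get_c_dj get_c_dj get_c_dj_alt
  rw [PySem.List.foldl_append_singleton_eq_map]
  simp only [List.nil_append]
  apply List.map_congr_left
  intro terms _
  exact row_eq vocab terms
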